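-- pv_equiv track=rewrite | github.com/jethack23/leetcode-daily | 2020/08/200815.py | split_into_nonoverlap
-- ===== SOURCE A (Python) =====
-- def split_into_nonoverlap(itvs):
--     ret = []
--     last = 0
--     for i in range(1, len(itvs)):
--         if itvs[i][0] >= itvs[i - 1][1]:
--             ret.append(itvs[last:i])
--             last = i
--     ret.append(itvs[last : len(itvs)])
--     return ret
-- ===== SOURCE B (Python) =====
-- def split_into_nonoverlap(itvs):
--     if not itvs:
--         return [[]]
--     done = []
--     cur = [itvs[0]]
--     for iv in itvs[1:]:
--         if iv[0] >= cur[-1][1]: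
--             done.append(cur)
--             cur = [iv]
--         else:
--             cur.append(iv)
--     done.append(cur)
--     return done
-- ===== Notes on version B (the rewrite author's own statement) =====
-- stated objective: alternative
-- what changed: B builds each group element-by-element with a current-group buffer (appending intervals and flushing the buffer at a gap), instead of A's index arithmetic that records a running start index and slices the original list; B never indexes or slices the input.
import Mathlib
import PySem

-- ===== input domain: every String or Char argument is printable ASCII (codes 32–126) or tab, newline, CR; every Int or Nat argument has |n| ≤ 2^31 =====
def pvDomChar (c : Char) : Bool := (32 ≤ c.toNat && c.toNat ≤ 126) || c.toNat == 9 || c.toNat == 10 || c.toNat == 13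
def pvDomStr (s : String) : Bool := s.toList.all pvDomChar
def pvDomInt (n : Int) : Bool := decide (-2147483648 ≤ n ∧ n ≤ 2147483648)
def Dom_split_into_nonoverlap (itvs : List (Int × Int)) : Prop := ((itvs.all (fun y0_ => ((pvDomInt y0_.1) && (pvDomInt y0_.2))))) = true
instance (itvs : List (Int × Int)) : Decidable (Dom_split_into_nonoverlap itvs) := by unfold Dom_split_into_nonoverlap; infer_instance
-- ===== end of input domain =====

-- B builds groups element-by-element with a current-group buffer instead of A's running start index plus slicing (alternative decomposition; return value only).
-- ===== PORT A =====
def split_into_nonoverlap (itvs : List (Int × Int)) : List (List (Int × Int)) :=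
  let st := (PySem.List.pyRange 1 itvs.length 1).foldl
    (fun (st : List (List (Int × Int)) × Int) i =>
      if (PySem.List.pyGetD itvs i (0, 0)).1 ≥ (PySem.List.pyGetD itvs (i - 1) (0, 0)).2 then
        (st.1 ++ [PySem.List.slice itvs (some st.2) (some i)], i)
      else st)
    ([], 0)
  st.1 ++ [PySem.List.slice itvs (some st.2) (some (itvs.length : Int))]

-- ===== PORT B =====
def split_into_nonoverlap_alt (itvs : List (Int × Int)) : List (List (Int × Int)) :=
  match itvs with
  | [] => [[]]
  | x :: rest =>
    let st := rest.foldl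
      (fun (st : List (List (Int × Int)) × List (Int × Int)) iv =>
        if iv.1 ≥ (PySem.List.pyGetD st.2 (-1) (0, 0)).2 then (st.1 ++ [st.2], [iv])
        else (st.1, st.2 ++ [iv]))
      ([], [x])
    st.1 ++ [st.2]

-- ===== PRECONDITION & SPEC =====
def Spec_split_into_nonoverlap (itvs : List (Int × Int)) (out : List (List (Int × Int))) : Prop := out = split_into_nonoverlap_alt itvs
instance (itvs : List (Int × Int)) (out : List (List (Int × Int))) : Decidable (Spec_split_into_nonoverlap itvs out) := by unfold Spec_split_into_nonoverlap; infer_instance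

-- ===== CLAIM =====
def Claim_equal_split_into_nonoverlap : Prop := ∀ (itvs : List (Int × Int)), Dom_split_into_nonoverlap itvs → Spec_split_into_nonoverlap itvs (split_into_nonoverlap itvs)

-- ===== LEMMAS AND PROOFS =====

-- canonical grouping of the tail after a first element x:
-- .1 = the rest of x's group, .2 = the later groups
def pvGch (x : Int × Int) : List (Int × Int) → List (Int × Int) × List (List (Int × Int))
  | [] => ([], [])
  | y :: l =>
    let r := pvGch y l
    if y.1 ≥ x.2 then ([], (y :: r.1) :: r.2) else (y :: r.1, r.2)

-- B's fold characterised by pvGch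
theorem pv_foldB :
    ∀ (l : List (Int × Int)) (done : List (List (Int × Int))) (c : List (Int × Int)) (x : Int × Int),
      ((l.foldl
          (fun (st : List (List (Int × Int)) × List (Int × Int)) iv =>
            if iv.1 ≥ (PySem.List.pyGetD st.2 (-1) (0, 0)).2 then (st.1 ++ [st.2], [iv])
            else (st.1, st.2 ++ [iv]))
          (done, c ++ [x])).1
       ++ [(l.foldl
          (fun (st : List (List (Int × Int)) × List (Int × Int)) iv =>
            if iv.1 ≥ (PySem.List.pyGetD st.2 (-1) (0, 0)).2 then (st.1 ++ [st.2], [iv])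
            else (st.1, st.2 ++ [iv]))
          (done, c ++ [x])).2])
      = done ++ ((c ++ [x]) ++ (pvGch x l).1) :: (pvGch x l).2 := by
  intro l
  induction l with
  | nil => intro done c x; simp [pvGch]
  | cons y l ih =>
    intro done c x
    simp only [List.foldl_cons, PySem.List.pyGetD_neg_one_append_singleton, pvGch]
    by_cases h : y.1 ≥ x.2
    · rw [if_pos h, if_pos h]
      have := ih (done ++ [c ++ [x]]) [] y
      simp only [List.nil_append] at this
      rw [this]
      simp
    · rw [if_neg h, if_neg h]
      have := ih done (c ++ [x]) y
      simp only [List.append_assoc] at this ⊢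
      rw [this]
      simp

-- A's fold over the index range [a, len) characterised by pvGch of the suffix
theorem pv_foldA (xs : List (Int × Int)) :
    ∀ (l : List (Int × Int)) (a last : Nat) (x : Int × Int) (ret : List (List (Int × Int))),
      1 ≤ a → last ≤ a → a ≤ xs.length → xs.drop a = l → xs[a - 1]? = some x →
      (((PySem.List.pyRange (a : Int) (xs.length : Int) 1).foldl
          (fun (st : List (List (Int × Int)) × Int) i =>
            if (PySem.List.pyGetD xs i (0, 0)).1 ≥ (PySem.List.pyGetD xs (i - 1) (0, 0)).2 then
              (st.1 ++ [PySem.List.slice xs (some st.2) (some i)], i)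
            else st)
          (ret, (last : Int))).1
       ++ [PySem.List.slice xs
            (some (((PySem.List.pyRange (a : Int) (xs.length : Int) 1).foldl
          (fun (st : List (List (Int × Int)) × Int) i =>
            if (PySem.List.pyGetD xs i (0, 0)).1 ≥ (PySem.List.pyGetD xs (i - 1) (0, 0)).2 then
              (st.1 ++ [PySem.List.slice xs (some st.2) (some i)], i)
            else st)
          (ret, (last : Int))).2))
            (some (xs.length : Int))])
      = ret ++ ((PySem.List.slice xs (some (last : Int)) (some (a : Int)) ++ (pvGch x l).1)
                :: (pvGch x l).2) := by
  intro l
  induction l with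
  | nil =>
    intro a last x ret h1 hla hale hdrop _
    have ha : a = xs.length := by
      have := List.drop_eq_nil_iff.mp hdrop
      omega
    subst ha
    rw [PySem.List.pyRange_one_eq_nil (by omega)]
    simp [pvGch]
  | cons y l ih =>
    intro a last x ret h1 hla hale hdrop hx
    have halt : a < xs.length := by
      by_contra h
      have : xs.drop a = [] := List.drop_eq_nil_iff.mpr (by omega)
      rw [hdrop] at this
      exact absurd this (by simp)
    have hy : xs[a]? = some y := by
      have : (xs.drop a)[0]? = some y := by rw [hdrop]; rfl
      simpa [List.getElem?_drop] using this
    have hdrop' : xs.drop (a + 1) = l := by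
      have : (xs.drop a).tail = l := by rw [hdrop]; rfl
      simpa [List.tail_drop] using this
    rw [PySem.List.pyRange_one_cons (by exact_mod_cast halt)]
    simp only [List.foldl_cons]
    have hga : PySem.List.pyGetD xs (a : Int) (0, 0) = y := by
      rw [PySem.List.pyGetD_natCast]
      simp [List.getD, hy]
    have hga' : PySem.List.pyGetD xs ((a : Int) - 1) (0, 0) = x := by
      have : ((a : Int) - 1) = ((a - 1 : Nat) : Int) := by omega
      rw [this, PySem.List.pyGetD_natCast]
      simp [List.getD, hx]
    rw [hga, hga']
    have hadd : ((a : Int) + 1) = ((a + 1 : Nat) : Int) := by push_cast; ring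
    by_cases h : y.1 ≥ x.2
    · rw [if_pos h]
      have := ih (a + 1) a y (ret ++ [PySem.List.slice xs (some (last : Int)) (some (a : Int))])
        (by omega) (by omega) (by omega) hdrop' (by simpa using hy)
      rw [hadd]
      rw [this]
      have hs1 : PySem.List.slice xs (some (a : Int)) (some ((a + 1 : Nat) : Int)) = [y] := by
        rw [PySem.List.slice_natCast, hdrop]
        simp
      rw [hs1]
      simp [pvGch, h]
    · rw [if_neg h]
      have := ih (a + 1) last y ret (by omega) (by omega) (by omega) hdrop' (by simpa using hy)
      rw [hadd]
      rw [this]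
      have hs2 : PySem.List.slice xs (some (last : Int)) (some ((a + 1 : Nat) : Int))
          = PySem.List.slice xs (some (last : Int)) (some (a : Int)) ++ [y] := by
        rw [PySem.List.slice_natCast, PySem.List.slice_natCast]
        have hsub : a + 1 - last = (a - last) + 1 := by omega
        rw [hsub, List.take_add_one]
        congr 1
        have : (xs.drop last)[a - last]? = some y := by
          rw [List.getElem?_drop]
          rw [show last + (a - last) = a from by omega]
          exact hy
        simp [this]
      rw [hs2]
      simp [pvGch, h]

-- ===== VERDICT =====
theorem split_into_nonoverlap_spec : Claim_equal_split_into_nonoverlap := by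
  intro itvs _
  unfold Spec_split_into_nonoverlap
  match itvs with
  | [] => rfl
  | x :: rest =>
    unfold split_into_nonoverlap split_into_nonoverlap_alt
    simp only []
    have hA := pv_foldA (x :: rest) rest 1 0 x [] (by omega) (by omega) (by simp)
      (by simp) (by simp)
    have hB := pv_foldB rest [] [] x
    simp only [List.nil_append, Nat.cast_zero, Nat.cast_one] at hA hB
    rw [hA, hB]
    have h01 : PySem.List.slice (x :: rest) (some ((0 : Nat) : Int)) (some ((1 : Nat) : Int)) = [x] := by
      rw [PySem.List.slice_natCast]; rfl
    simp only [Nat.cast_zero, Nat.cast_one] at h01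
    rw [h01]
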